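-- pv_equiv track=rewrite | github.com/zhuny/Codejam | Pylons/__main__.py | travel_path
-- ===== SOURCE A (Python) =====
-- def is_invalid(p1, p2):
--     return (
--         p1[0] == p2[0] or
--         p1[1] == p2[1] or
--         p1[0]+p1[1] == p2[0]+p2[1] or
--         p1[0]-p1[1] == p2[0]-p2[1]
--     )
--
-- def travel_path(vs, path):
--     if len(vs) == 0:
--         return True
--
--     for v in list(vs):
--         if path and is_invalid(path[-1], v):
--             pass
--         else:
--             vs.remove(v)
--             path.append(v)
--             if travel_path(vs, path):
--                 return True
--             path.pop()
--             vs.add(v)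
--     return False
-- ===== SOURCE B (Python) =====
-- def is_invalid(p1, p2):
--     return (
--         p1[0] == p2[0] or
--         p1[1] == p2[1] or
--         p1[0]+p1[1] == p2[0]+p2[1] or
--         p1[0]-p1[1] == p2[0]-p2[1]
--     )
--
-- def travel_path(vs, path):
--     def solve(rem, last):
--         return not rem or any(
--             (last is None or not is_invalid(last, rem[i]))
--             and solve(rem[:i] + rem[i+1:], rem[i])
--             for i in range(len(rem))
--         )
--     return solve(list(vs), path[-1] if path else None)
-- ===== Notes on version B (the rewrite author's own statement) =====
-- stated objective: simpler
-- what changed: Replaces the mutate-snapshot-undo loop (vs.remove/path.append/path.pop/vs.add) by a pure recursive solve(rem, last) that carries only the remaining candidates and the last placed cell, removing candidates by slicing and folding the search into a single any(...) expression; return value only, B does not mutate vs or path.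
-- outside the precondition, e.g. on travel_path({(1,)}, []): A returns True, B returns True; on travel_path({(1,), (1, 2)}, []): A returns False, B returns False
import Mathlib
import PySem

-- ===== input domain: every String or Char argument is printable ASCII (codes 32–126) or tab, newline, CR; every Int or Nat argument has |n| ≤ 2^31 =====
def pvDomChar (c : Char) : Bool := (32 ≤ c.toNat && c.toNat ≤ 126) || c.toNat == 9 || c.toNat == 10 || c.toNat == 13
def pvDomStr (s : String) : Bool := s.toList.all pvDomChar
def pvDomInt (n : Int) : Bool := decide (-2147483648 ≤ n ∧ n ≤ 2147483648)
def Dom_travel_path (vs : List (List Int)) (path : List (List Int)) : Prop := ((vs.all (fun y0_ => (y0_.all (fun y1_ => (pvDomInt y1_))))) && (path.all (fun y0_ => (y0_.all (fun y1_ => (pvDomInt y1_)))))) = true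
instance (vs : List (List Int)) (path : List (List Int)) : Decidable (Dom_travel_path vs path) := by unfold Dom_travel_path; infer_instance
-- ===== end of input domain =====

-- B replaces A's mutate/snapshot/undo backtracking loop by a pure recursive solve over
-- (remaining, last) with positional removal and a single any(...) — simpler, same cost.
-- A mutates vs and path in place (observable on success); the equivalence proved here is
-- about the RETURN value only: B performs no mutation.
-- Both ports use a fuel argument (vs.length + 1, always sufficient) purely as a
-- structural-termination device; it changes no computed value.

-- ===== PORT A =====
-- shared module helper: Python p[i] for i = 0,1 (Pre_ keeps every indexed tuple at length ≥ 2,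
-- so pyGet? is some there; the getD 0 default is never used on admitted inputs)
def pyAt (l : List Int) (i : Int) : Int := (PySem.List.pyGet? l i).getD 0

def is_invalid (p1 p2 : List Int) : Bool :=
  decide (pyAt p1 0 = pyAt p2 0) ||
  decide (pyAt p1 1 = pyAt p2 1) ||
  decide (pyAt p1 0 + pyAt p1 1 = pyAt p2 0 + pyAt p2 1) ||
  decide (pyAt p1 0 - pyAt p1 1 = pyAt p2 0 - pyAt p2 1)

-- A's for-loop over the snapshot list(vs): vs.remove(v)/path.append(v) before the recursive
-- call (recur), and the undo on failure is the unchanged vs/path of the next iteration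
def loopA (recur : List (List Int) → List (List Int) → Bool) :
    List (List Int) → List (List Int) → List (List Int) → Bool
  | [], _, _ => false
  | v :: rest, vs, path =>
    if path ≠ [] ∧ is_invalid (path.getLast?.getD []) v = true then
      loopA recur rest vs path
    else
      (if recur (vs.erase v) (path ++ [v]) then true
       else loopA recur rest vs path)

def travelFuel : Nat → List (List Int) → List (List Int) → Bool
  | 0, _, _ => true           -- fuel exhausted: unreachable, travel_path passes vs.length + 1
  | f + 1, vs, path =>
    if vs.length = 0 then true
    else loopA (travelFuel f) vs vs path

def travel_path (vs : List (List Int)) (path : List (List Int)) : Bool :=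
  travelFuel (vs.length + 1) vs path

-- ===== PORT B =====
def checkLast (last : Option (List Int)) (v : List Int) : Bool :=
  match last with
  | none => true
  | some l => !(is_invalid l v)

-- B: solve(rem, last) = not rem or any((last ok) and solve(rem without i, rem[i]) for i in range(len(rem)))
def solveFuel : Nat → List (List Int) → Option (List Int) → Bool
  | 0, _, _ => true           -- fuel exhausted: unreachable, travel_path_alt passes vs.length + 1
  | f + 1, rem, last =>
    rem.isEmpty ||
      (List.range rem.length).any (fun i =>
        checkLast last (rem.getD i []) &&
          solveFuel f (rem.take i ++ rem.drop (i + 1)) (some (rem.getD i [])))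

def travel_path_alt (vs : List (List Int)) (path : List (List Int)) : Bool :=
  solveFuel (vs.length + 1) vs path.getLast?

-- ===== PRECONDITION & SPEC =====
-- Pre_ excludes (a) vs-lists with duplicates, which do not model a Python set, and
-- (b) inputs containing an indexed tuple of fewer than 2 coordinates, on which A's
-- is_invalid may raise IndexError (on a few such inputs A still returns; see cites).
def Pre_travel_path (vs : List (List Int)) (path : List (List Int)) : Prop :=
  vs.Nodup ∧
  (vs = [] ∨ ((∀ l ∈ vs, 2 ≤ l.length) ∧ (path = [] ∨ 2 ≤ (path.getLast?.getD []).length)))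
instance (vs : List (List Int)) (path : List (List Int)) : Decidable (Pre_travel_path vs path) := by
  unfold Pre_travel_path; infer_instance

def pvWitness_travel_path : List (List Int) × List (List Int) := ([[0, 0], [1, 2]], [])

def Spec_travel_path (vs : List (List Int)) (path : List (List Int)) (out : Bool) : Prop := out = travel_path_alt vs path
instance (vs : List (List Int)) (path : List (List Int)) (out : Bool) : Decidable (Spec_travel_path vs path out) := by unfold Spec_travel_path; infer_instance

-- ===== CLAIM (what is proved, stated in full; the proofs are below) =====
def Claim_equal_travel_path : Prop := ∀ (vs : List (List Int)) (path : List (List Int)), Dom_travel_path vs path → Pre_travel_path vs path → Spec_travel_path vs path (travel_path vs path)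

-- ===== LEMMAS AND PROOFS =====

theorem erase_at (vs : List (List Int)) (k : Nat) (hk : k < vs.length) (hnd : vs.Nodup) :
    vs.erase vs[k] = vs.take k ++ vs.drop (k + 1) := by
  have hsplit : vs = vs.take k ++ vs[k] :: vs.drop (k + 1) := by
    conv_lhs => rw [← List.take_append_drop k vs]
    rw [List.drop_eq_getElem_cons hk]
  have hnd' : (vs.take k ++ vs[k] :: vs.drop (k + 1)).Nodup := hsplit ▸ hnd
  have hnm : vs[k] ∉ vs.take k := by
    rcases List.nodup_append.mp hnd' with ⟨-, -, hdisj⟩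
    intro hm
    have hmem2 : vs[k] ∈ vs[k] :: vs.drop (k + 1) := List.mem_cons_self
    exact hdisj _ hm _ hmem2 rfl
  calc vs.erase vs[k] = (vs.take k ++ vs[k] :: vs.drop (k + 1)).erase vs[k] := by rw [← hsplit]
    _ = vs.take k ++ ((vs[k] :: vs.drop (k + 1)).erase vs[k]) := by
          rw [List.erase_append_right _ hnm]
    _ = vs.take k ++ vs.drop (k + 1) := by rw [List.erase_cons_head]

theorem loop_eq (f : Nat)
    (IH : ∀ vs path, vs.length < f → vs.Nodup →
      travelFuel f vs path = solveFuel f vs path.getLast?) :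
    ∀ (m k : Nat) (vs path : List (List Int)), vs.length ≤ f → vs.Nodup →
      vs.length - k ≤ m →
      loopA (travelFuel f) (vs.drop k) vs path =
        (List.range' k (vs.length - k)).any (fun i =>
          checkLast path.getLast? (vs.getD i []) &&
            solveFuel f (vs.take i ++ vs.drop (i + 1)) (some (vs.getD i []))) := by
  intro m
  induction m with
  | zero =>
    intro k vs path hlen hnd hm
    have hk : vs.length ≤ k := by omega
    have h0 : vs.length - k = 0 := by omega
    rw [List.drop_eq_nil_of_le hk, h0]
    simp [loopA]
  | succ m ih =>
    intro k vs path hlen hnd hm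
    by_cases hk : k < vs.length
    · have hdrop : vs.drop k = vs[k] :: vs.drop (k + 1) := List.drop_eq_getElem_cons hk
      have hmem : vs[k] ∈ vs := List.getElem_mem hk
      have hgd : vs.getD k [] = vs[k] := by
        simp [List.getD_eq_getElem?_getD, List.getElem?_eq_getElem hk]
      have hrec : travelFuel f (vs.erase vs[k]) (path ++ [vs[k]]) =
          solveFuel f (vs.take k ++ vs.drop (k + 1)) (some vs[k]) := by
        have h1 := IH (vs.erase vs[k]) (path ++ [vs[k]])
          (by rw [List.length_erase_of_mem hmem]; have := List.length_pos_of_mem hmem; omega)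
          (hnd.erase _)
        rw [List.getLast?_concat] at h1
        rw [erase_at vs k hk hnd] at h1
        rw [erase_at vs k hk hnd]
        exact h1
      have hloop := ih (k + 1) vs path hlen hnd (by omega)
      have hn : vs.length - k = (vs.length - (k + 1)) + 1 := by omega
      rw [hdrop, hn, List.range'_succ, List.any_cons, hgd]
      simp only [loopA]
      rw [hloop]
      by_cases hp0 : path = []
      · subst hp0
        rw [if_neg (by simp)]
        rw [hrec]
        simp only [List.getLast?_nil, checkLast, Bool.true_and]
        cases solveFuel f (vs.take k ++ vs.drop (k + 1)) (some vs[k]) <;> simp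
      · have hlast : path.getLast? = some (path.getLast hp0) := by
          exact List.getLast?_eq_some_getLast hp0
        rw [hlast]
        simp only [Option.getD_some, checkLast]
        by_cases hinv : is_invalid (path.getLast hp0) vs[k] = true
        · rw [if_pos ⟨hp0, hinv⟩, hinv]
          simp
        · rw [if_neg (fun hc => hinv hc.2)]
          have hinv' : is_invalid (path.getLast hp0) vs[k] = false := by
            rwa [← Bool.not_eq_true]
          rw [hrec, hinv']
          cases solveFuel f (vs.take k ++ vs.drop (k + 1)) (some vs[k]) <;> simp
    · have hk' : vs.length ≤ k := by omega
      have h0 : vs.length - k = 0 := by omega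
      rw [List.drop_eq_nil_of_le hk', h0]
      simp [loopA]

theorem main_eq : ∀ (f : Nat) (vs path : List (List Int)), vs.length < f → vs.Nodup →
    travelFuel f vs path = solveFuel f vs path.getLast? := by
  intro f
  induction f with
  | zero => intro vs path hlen _; omega
  | succ f ih =>
    intro vs path hlen hnd
    simp only [travelFuel, solveFuel]
    by_cases h0 : vs.length = 0
    · have hnil : vs = [] := by
        cases vs with
        | nil => rfl
        | cons a l => simp at h0
      subst hnil
      simp
    · rw [if_neg h0]
      have hne : vs.isEmpty = false := by
        cases vs with
        | nil => simp at h0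
        | cons a l => rfl
      rw [hne]
      have hl := loop_eq f ih (vs.length - 0) 0 vs path (by omega) hnd (by omega)
      rw [List.drop_zero, Nat.sub_zero] at hl
      rw [hl, ← List.range_eq_range']
      simp

-- ===== VERDICT (by name: the statement is the Claim_ definition above) =====
theorem travel_path_spec : Claim_equal_travel_path := by
  intro vs path _ hpre
  unfold Spec_travel_path travel_path_alt travel_path
  exact main_eq (vs.length + 1) vs path (by omega) hpre.1
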